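-- pv_equiv track=rewrite | github.com/volodymyr-hlavnyi/ich-hub-learn-2024 | python/hw/hw_10.py | hw10_2
-- ===== SOURCE A (Python) =====
-- def hw10_2(input_string: str = 'Hello'):
--     str_what_repeated = ''
--     for i in input_string:
--         if input_string.count(i) > 1:
--             if i not in str_what_repeated:
--                 str_what_repeated += i
--     if str_what_repeated not in '':
--         str_4_print = f"{' and '.join(str_what_repeated)}"
--         return f"Symbols {str_4_print} repeat."
--     else:
--         return "All symbols in the string are unique."
-- ===== SOURCE B (Python) =====
-- def hw10_2(input_string: str = 'Hello'):
--     srt = sorted(input_string)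
--     dups = {a for a, b in zip(srt, srt[1:]) if a == b}
--     repeated = [ch for ch in dict.fromkeys(input_string) if ch in dups]
--     if repeated:
--         return f"Symbols {' and '.join(repeated)} repeat."
--     return "All symbols in the string are unique."
-- ===== Notes on version B (the rewrite author's own statement) =====
-- stated objective: faster
-- what changed: B finds the duplicate characters by sorting the string and comparing adjacent neighbours (a set comprehension over zip(srt, srt[1:])), then filters the first-appearance-ordered distinct characters (dict.fromkeys) by membership in that set, replacing A's per-character full-string count rescans and accumulator membership dedup.
import Mathlib
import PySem

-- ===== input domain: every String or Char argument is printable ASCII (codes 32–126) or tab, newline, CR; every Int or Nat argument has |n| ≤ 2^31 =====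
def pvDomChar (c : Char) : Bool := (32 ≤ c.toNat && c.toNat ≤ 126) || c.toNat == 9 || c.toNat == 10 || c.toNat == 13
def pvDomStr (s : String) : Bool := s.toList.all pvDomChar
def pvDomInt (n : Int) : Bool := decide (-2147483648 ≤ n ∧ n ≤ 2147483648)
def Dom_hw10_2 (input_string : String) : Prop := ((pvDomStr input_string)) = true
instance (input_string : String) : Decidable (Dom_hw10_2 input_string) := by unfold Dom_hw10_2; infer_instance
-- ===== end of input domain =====

-- B detects duplicates by sorting the characters and comparing adjacent neighbours
-- (then filters the first-appearance-ordered distinct characters by that set),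
-- instead of A's per-character full-string `count` rescans and accumulator dedup.

-- ===== PORT A =====
-- str_what_repeated accumulated as a List Char; input_string.count(i) for a single char is the char count.
def hw10_2 (input_string : String) : String :=
  let cs := input_string.toList
  let rep := cs.foldl
    (fun acc i => if cs.count i > 1 then (if i ∈ acc then acc else acc ++ [i]) else acc) []
  if rep ≠ [] then
    String.ofList ("Symbols ".toList ++ PySem.Chars.join " and ".toList (rep.map (fun c => [c])) ++ " repeat.".toList)
  else "All symbols in the string are unique."

-- ===== PORT B =====
-- sorted(input_string) = PySem.List.sorted (identity key); srt[1:] = drop 1;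
-- the set comprehension builds a PySem.Set; dict.fromkeys = PySem.List.dedup.
-- helper: the '{a for a, b in zip(srt, srt[1:]) if a == b}' comprehension body (before ofList)
def adjDups (l : List Char) : List Char :=
  ((l.zip (l.drop 1)).filter (fun p => p.1 == p.2)).map Prod.fst

def hw10_2_alt (input_string : String) : String :=
  let cs := input_string.toList
  let srt := PySem.List.sorted cs (fun c => c) false
  let dups : PySem.Set Char := PySem.Set.ofList (adjDups srt)
  let repeated := (PySem.List.dedup cs).filter (fun ch => ch ∈ dups)
  if repeated ≠ [] then
    String.ofList ("Symbols ".toList ++ PySem.Chars.join " and ".toList (repeated.map (fun c => [c])) ++ " repeat.".toList)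
  else "All symbols in the string are unique."

-- ===== PRECONDITION & SPEC =====
def Spec_hw10_2 (input_string : String) (out : String) : Prop := out = hw10_2_alt input_string
instance (input_string : String) (out : String) : Decidable (Spec_hw10_2 input_string out) := by unfold Spec_hw10_2; infer_instance

-- ===== CLAIM (what is proved, stated in full; the proofs are below) =====
def Claim_equal_hw10_2 : Prop := ∀ (input_string : String), Dom_hw10_2 input_string → Spec_hw10_2 input_string (hw10_2 input_string)

-- ===== LEMMAS AND PROOFS =====

lemma mem_adjDups_mem {l : List Char} {a : Char} (h : a ∈ adjDups l) : a ∈ l := by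
  unfold adjDups at h
  rcases List.mem_map.mp h with ⟨p, hp, rfl⟩
  exact (List.of_mem_zip (List.mem_filter.mp hp).1).1

-- in a sorted list, a character has an equal adjacent neighbour iff it occurs more than once
lemma mem_adjDups_iff_count (l : List Char) (hs : l.Pairwise (· ≤ ·)) (a : Char) :
    a ∈ adjDups l ↔ 1 < l.count a := by
  induction l with
  | nil => simp [adjDups]
  | cons x t ih =>
    cases t with
    | nil =>
      simp only [adjDups, List.drop_one, List.tail_cons, List.zip_nil_right, List.filter_nil,
        List.map_nil, List.not_mem_nil, false_iff, not_lt, List.count_cons, List.count_nil]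
      split <;> simp
    | cons y t =>
      have hxy : x ≤ y := (List.pairwise_cons.mp hs).1 y (by simp)
      have hyt : (y :: t).Pairwise (· ≤ ·) := (List.pairwise_cons.mp hs).2
      have hxall : ∀ z ∈ y :: t, x ≤ z := (List.pairwise_cons.mp hs).1
      have hyall : ∀ z ∈ t, y ≤ z := (List.pairwise_cons.mp hyt).1
      have hstep : adjDups (x :: y :: t)
          = (if x == y then [x] else []) ++ adjDups (y :: t) := by
        unfold adjDups
        simp only [List.drop_one, List.tail_cons, List.zip_cons_cons, List.filter_cons]
        split_ifs <;> simp
      rw [hstep]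
      by_cases hax : a = x
      · by_cases heq : x = y
        · have h1 : (x == a) = true := by simp [hax.symm]
          have h2 : (y == a) = true := by simp [(hax.trans heq).symm]
          have hif : (x == y) = true := by simp [heq]
          rw [hif]
          constructor
          · intro _
            rw [List.count_cons, List.count_cons, h1, h2]
            simp only [if_true]
            omega
          · intro _
            exact List.mem_append.mpr (Or.inl (by simp [hax]))
        · have hnot : a ∉ y :: t := by
            intro hm
            rcases List.mem_cons.mp hm with h' | hm'
            · exact heq (hax ▸ h')
            · exact heq (le_antisymm hxy (hax ▸ hyall a hm'))
          have h1 : a ∉ adjDups (y :: t) := fun h => hnot (mem_adjDups_mem h)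
          have h2 : (y :: t).count a = 0 := List.count_eq_zero.mpr hnot
          have hb : (x == y) = false := by simp [heq]
          have hc : (x :: y :: t).count a = 1 := by
            rw [List.count_cons, h2]
            simp [hax.symm]
          rw [hb]
          simp [h1, hc]
      · have hb2 : (x == a) = false := by simp [Ne.symm hax]
        have hcnt : (x :: y :: t).count a = (y :: t).count a := by
          rw [List.count_cons, hb2]
          simp
        rw [hcnt, ← ih hyt]
        by_cases heq : x = y
        · have hay : ¬ a = y := heq ▸ hax
          simp [heq, hay]
        · have hb : (x == y) = false := by simp [heq]
          simp [hb]

-- B's repeated list equals the filtered ordered dedup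
lemma repeated_eq (cs : List Char) :
    (PySem.List.dedup cs).filter
        (fun ch => ch ∈ PySem.Set.ofList (adjDups (PySem.List.sorted cs (fun c => c) false)))
      = (PySem.List.dedup cs).filter (fun i => cs.count i > 1) := by
  apply List.filter_congr
  intro x _
  have hperm : (PySem.List.sorted cs (fun c => c) false).Perm cs := PySem.List.sorted_perm cs _ _
  have hs : (PySem.List.sorted cs (fun c => c) false).Pairwise (· ≤ ·) :=
    PySem.List.sorted_pairwise cs (fun c => c)
  have h := mem_adjDups_iff_count _ hs x
  rw [hperm.count_eq] at h
  simp [PySem.Set.mem_ofList, h]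

-- A's loop, started from the filtered dedup of a prefix, computes the filtered dedup of the whole list.
lemma hw10_loop_eq (cs : List Char) :
    ∀ (rest pre : List Char),
      rest.foldl
        (fun acc i => if cs.count i > 1 then (if i ∈ acc then acc else acc ++ [i]) else acc)
        ((PySem.List.dedup pre).filter (fun i => cs.count i > 1))
      = (PySem.List.dedup (pre ++ rest)).filter (fun i => cs.count i > 1) := by
  intro rest
  induction rest with
  | nil => intro pre; simp
  | cons i rest ih =>
    intro pre
    have h1 : pre ++ i :: rest = (pre ++ [i]) ++ rest := by simp
    rw [List.foldl_cons, h1, ← ih (pre ++ [i])]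
    congr 1
    simp only [PySem.List.dedup_eq_ofList]
    have hded : PySem.Set.ofList (pre ++ [i])
        = if i ∈ PySem.Set.ofList pre then PySem.Set.ofList pre else PySem.Set.ofList pre ++ [i] := by
      simp only [PySem.Set.ofList, List.foldl_append, List.foldl_cons, List.foldl_nil,
        PySem.Set.add]
      simp
    rw [hded]
    by_cases hm : i ∈ pre
    · have hm' : i ∈ PySem.Set.ofList pre := (PySem.Set.mem_ofList pre i).mpr hm
      by_cases hP : cs.count i > 1
      · have hmem : i ∈ (PySem.Set.ofList pre).filter (fun j => decide (cs.count j > 1)) := by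
          simp [List.mem_filter, hm, hP]
        simp [hP, hm', hmem]
      · simp [hP, hm']
    · have hm' : i ∉ PySem.Set.ofList pre := fun hc => hm ((PySem.Set.mem_ofList pre i).mp hc)
      by_cases hP : cs.count i > 1
      · have hmem : i ∉ (PySem.Set.ofList pre).filter (fun j => decide (cs.count j > 1)) := by
          simp [List.mem_filter, hm]
        simp [hP, hm', hmem, List.filter_append]
      · simp [hP, hm', List.filter_append]

-- ===== VERDICT (by name: the statement is the Claim_ definition above) =====
theorem hw10_2_spec : Claim_equal_hw10_2 := by
  intro s _
  unfold Spec_hw10_2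
  have hA := hw10_loop_eq s.toList s.toList []
  simp only [List.nil_append] at hA
  have h0 : (PySem.List.dedup ([] : List Char)).filter (fun i => s.toList.count i > 1) = [] := by
    simp [PySem.List.dedup_eq_ofList, PySem.Set.ofList]
  rw [h0] at hA
  simp only [hw10_2, hw10_2_alt, hA, repeated_eq]
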